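-- pv_equiv track=rewrite | github.com/safiyayunaeva/leetcodeGrinding | NeetCode150/Blind75Hard.py | sameSubstring
-- ===== SOURCE A (Python) =====
-- def sameSubstring(s, t, K):
--     max_len = 0
--     n = len(s)
--
--     # Iterate over the lengths of the substrings
--     for length in range(1, n + 1):
--         for i in range(n - length + 1):
--             cost = 0
--             for j in range(i, i + length):
--                 cost += abs(ord(s[j]) - ord(t[j]))
--             if cost <= K and length > max_len:
--                 max_len = length
--
--     return max_len
-- ===== SOURCE B (Python) =====
-- def sameSubstring(s, t, K):
--     n = len(s)
--     best = 0
--     for i in range(n):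
--         cur = 0
--         j = i
--         while j < n and cur + abs(ord(s[j]) - ord(t[j])) <= K:
--             cur += abs(ord(s[j]) - ord(t[j]))
--             j += 1
--         if j - i > best:
--             best = j - i
--     return best
-- ===== Notes on version B (the rewrite author's own statement) =====
-- stated objective: faster
-- what changed: Replaces A's enumerate-every-(length,start) triple loop that recomputes each window's cost from scratch with a single pass over window starts that greedily extends each window while the running cost stays at most K (valid because per-position costs are nonnegative, so window cost is monotone in length).
import Mathlib
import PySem

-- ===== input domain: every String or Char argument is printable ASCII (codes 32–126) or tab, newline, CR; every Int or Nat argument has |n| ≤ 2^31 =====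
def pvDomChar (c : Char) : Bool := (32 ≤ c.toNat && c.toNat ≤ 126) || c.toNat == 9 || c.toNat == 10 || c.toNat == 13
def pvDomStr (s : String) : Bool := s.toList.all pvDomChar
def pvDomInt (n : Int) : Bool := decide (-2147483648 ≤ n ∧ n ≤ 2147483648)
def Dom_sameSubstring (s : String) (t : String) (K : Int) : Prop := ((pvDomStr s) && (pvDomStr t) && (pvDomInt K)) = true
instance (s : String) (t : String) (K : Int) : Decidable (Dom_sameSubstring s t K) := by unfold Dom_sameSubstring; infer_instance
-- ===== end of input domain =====

-- B replaces A's enumerate-every-(length,start)-window triple loop by a single pass over starts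
-- that greedily extends each window while the running cost stays ≤ K (objective: faster).

-- ===== PORT A =====
-- ord(x[j]) for an Int index j; under Pre_ every index used is in range, so the getD default is never reached
def ordAt (x : String) (j : Int) : Int :=
  ((PySem.Str.pyGet? x j).map (fun ch => (ch.toNat : Int))).getD 0

def sameSubstring (s : String) (t : String) (K : Int) : Int :=
  let n : Int := PySem.Str.len s
  (PySem.List.pyRange 1 (n + 1) 1).foldl (fun max_len length =>
    (PySem.List.pyRange 0 (n - length + 1) 1).foldl (fun max_len i =>
      let cost := (PySem.List.pyRange i (i + length) 1).foldl
        (fun cost j => cost + |ordAt s j - ordAt t j|) 0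
      if cost ≤ K ∧ length > max_len then length else max_len) max_len) 0

-- ===== PORT B =====
-- the while loop of B: advance j while j < n and the running cost cur stays ≤ K after adding d j
def extendWhile (d : Int → Int) (K n : Int) (j cur : Int) : Int :=
  if h : j < n ∧ cur + d j ≤ K then extendWhile d K n (j + 1) (cur + d j) else j
termination_by (n - j).toNat
decreasing_by omega

def sameSubstring_alt (s : String) (t : String) (K : Int) : Int :=
  let n : Int := PySem.Str.len s
  (PySem.List.pyRange 0 n 1).foldl (fun best i =>
    let j := extendWhile (fun j => |ordAt s j - ordAt t j|) K n i 0
    if j - i > best then j - i else best) 0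

-- ===== PRECONDITION & SPEC =====
-- Pre_ excludes exactly the inputs where the Python A raises IndexError (A reads t[j] for every
-- j < len(s), so it raises iff len(t) < len(s)); B raises there too.
def Pre_sameSubstring (s : String) (t : String) (K : Int) : Prop :=
  PySem.Str.len s ≤ PySem.Str.len t
instance (s : String) (t : String) (K : Int) : Decidable (Pre_sameSubstring s t K) := by
  unfold Pre_sameSubstring; infer_instance

def pvWitness_sameSubstring : String × String × Int := ("abc", "abd", 2)

def Spec_sameSubstring (s : String) (t : String) (K : Int) (out : Int) : Prop := out = sameSubstring_alt s t K
instance (s : String) (t : String) (K : Int) (out : Int) : Decidable (Spec_sameSubstring s t K out) := by unfold Spec_sameSubstring; infer_instance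

-- ===== CLAIM (what is proved, stated in full; the proofs are below) =====
def Claim_equal_sameSubstring : Prop := ∀ (s : String) (t : String) (K : Int), Dom_sameSubstring s t K → Pre_sameSubstring s t K → Spec_sameSubstring s t K (sameSubstring s t K)

-- ===== LEMMAS AND PROOFS =====

-- the running cost of the window [i, i+L): exactly A's inner loop
def W (d : Int → Int) (i L : Int) : Int :=
  (PySem.List.pyRange i (i + L) 1).foldl (fun cost j => cost + d j) 0

-- A's contribution for one window length L: L if some window of that length is affordable, else 0
def gA (d : Int → Int) (K n L : Int) : Int :=
  if (PySem.List.pyRange 0 (n - L + 1) 1).any (fun i => decide (W d i L ≤ K)) then L else 0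

theorem W_zero (d : Int → Int) (i : Int) : W d i 0 = 0 := by
  simp [W]

theorem W_succ (d : Int → Int) (i L : Int) (h : 0 ≤ L) :
    W d i (L + 1) = W d i L + d (i + L) := by
  unfold W
  rw [show i + (L + 1) = (i + L) + 1 by ring,
    PySem.List.pyRange_one_succ_right (by omega : i ≤ i + L)]
  simp [List.foldl_append]

theorem W_mono (d : Int → Int) (hd : ∀ j, 0 ≤ d j) (i L L' : Int) (h0 : 0 ≤ L) (h : L ≤ L') :
    W d i L ≤ W d i L' := by
  induction L', h using Int.le_induction with
  | base => exact le_rfl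
  | succ L' hL' ih =>
      have := W_succ d i L' (by omega)
      have := hd (i + L')
      omega

theorem extendWhile_ge (d : Int → Int) (K n j cur : Int) : j ≤ extendWhile d K n j cur := by
  fun_induction extendWhile with
  | case1 j cur h ih => omega
  | case2 j cur h => exact le_rfl

theorem extendWhile_le (d : Int → Int) (K n : Int) : ∀ j cur, j ≤ n → extendWhile d K n j cur ≤ n := by
  intro j cur
  fun_induction extendWhile with
  | case1 j cur h ih => intro _; exact ih (by omega)
  | case2 j cur h => intro h'; exact h'

-- the window the while loop returns is affordable (when it is nonempty)
theorem extendWhile_feas (d : Int → Int) (K n : Int) (i : Int) :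
    ∀ j cur, i ≤ j → cur = W d i (j - i) → (i < j → cur ≤ K) →
      i < extendWhile d K n j cur → W d i (extendWhile d K n j cur - i) ≤ K := by
  intro j cur
  fun_induction extendWhile with
  | case1 j cur h ih =>
      intro hij hcur hk hlt
      refine ih (by omega) ?_ (fun _ => h.2) hlt
      have := W_succ d i (j - i) (by omega)
      rw [show i + (j - i) = j by ring] at this
      rw [show j + 1 - i = (j - i) + 1 by ring, this, hcur]
  | case2 j cur h =>
      intro hij hcur hk hlt
      rw [← hcur]; exact hk hlt

-- the window the while loop returns is the longest affordable one starting at i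
theorem extendWhile_max (d : Int → Int) (hd : ∀ j, 0 ≤ d j) (K n : Int) (i : Int) :
    ∀ j cur, i ≤ j → cur = W d i (j - i) →
      ∀ m, j ≤ m → m ≤ n → W d i (m - i) ≤ K → m ≤ extendWhile d K n j cur := by
  intro j cur
  fun_induction extendWhile with
  | case1 j cur h ih =>
      intro hij hcur m hm1 hm2 hfeas
      by_cases hmj : m ≤ j
      · calc m ≤ j + 1 := by omega
          _ ≤ extendWhile d K n (j + 1) (cur + d j) := extendWhile_ge d K n _ _
      · refine ih (by omega) ?_ m (by omega) hm2 hfeas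
        have := W_succ d i (j - i) (by omega)
        rw [show i + (j - i) = j by ring] at this
        rw [show j + 1 - i = (j - i) + 1 by ring, this, hcur]
  | case2 j cur h =>
      intro hij hcur m hm1 hm2 hfeas
      by_contra hc
      have hjn : j < n := by omega
      have hWj1 : W d i (j + 1 - i) ≤ W d i (m - i) :=
        W_mono d hd i _ _ (by omega) (by omega)
      have := W_succ d i (j - i) (by omega)
      rw [show i + (j - i) = j by ring] at this
      rw [show j + 1 - i = (j - i) + 1 by ring, this, ← hcur] at hWj1
      exact h ⟨hjn, by omega⟩

theorem le_foldl_max_init (g : Int → Int) (l : List Int) (a : Int) :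
    a ≤ l.foldl (fun m x => max m (g x)) a := by
  rw [← List.foldl_map]
  exact (PySem.List.le_foldl_max (l.map g) a).1

theorem le_foldl_max_of_mem (g : Int → Int) (l : List Int) (a x : Int) (hx : x ∈ l) :
    g x ≤ l.foldl (fun m x => max m (g x)) a := by
  rw [← List.foldl_map]
  exact (PySem.List.le_foldl_max (l.map g) a).2 (g x) (List.mem_map_of_mem hx)

theorem foldl_max_le (g : Int → Int) : ∀ (l : List Int) (a b : Int), a ≤ b →
    (∀ x ∈ l, g x ≤ b) → l.foldl (fun m x => max m (g x)) a ≤ b := by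
  intro l
  induction l with
  | nil => intro a b ha _; exact ha
  | cons y l ih =>
      intro a b ha h
      exact ih _ _ (max_le ha (h y (by simp))) (fun x hx => h x (by simp [hx]))

-- A's inner loop over starts i, characterized
theorem Amid (d : Int → Int) (K L : Int) (hL : 0 < L) :
    ∀ (l : List Int) (a : Int), 0 ≤ a →
      l.foldl (fun m i => if W d i L ≤ K ∧ L > m then L else m) a
        = max a (if l.any (fun i => decide (W d i L ≤ K)) then L else 0) := by
  intro l
  induction l with
  | nil => intro a ha; simp; omega
  | cons i l ih =>
      intro a ha
      simp only [List.foldl_cons, List.any_cons]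
      by_cases hW : W d i L ≤ K
      · rw [ih _ (by split_ifs <;> omega)]
        simp only [hW, decide_true, Bool.true_or, if_true, true_and]
        have h1 : (if L > a then L else a) = max a L := by
          rcases lt_or_ge a L with h | h
          · rw [if_pos h, max_eq_right (le_of_lt h)]
          · rw [if_neg (by omega), max_eq_left h]
        rw [h1, max_eq_left]
        split_ifs
        · exact le_max_right a L
        · exact le_trans ha (le_max_left a L)
      · simp only [hW, decide_false, Bool.false_or, false_and, if_false]
        exact ih a ha

-- A's outer loop rewritten as a fold of maxima
theorem outerA (d : Int → Int) (K n : Int) :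
    ∀ (ls : List Int) (a : Int), 0 ≤ a → (∀ L ∈ ls, 0 < L) →
      ls.foldl (fun max_len length =>
        (PySem.List.pyRange 0 (n - length + 1) 1).foldl (fun max_len i =>
          if (PySem.List.pyRange i (i + length) 1).foldl (fun cost j => cost + d j) 0 ≤ K
              ∧ length > max_len then length else max_len) max_len) a
        = ls.foldl (fun m L => max m (gA d K n L)) a := by
  intro ls
  induction ls with
  | nil => intro a _ _; rfl
  | cons L ls ih =>
      intro a ha hpos
      simp only [List.foldl_cons]
      have hL : 0 < L := hpos L (by simp)
      rw [show (PySem.List.pyRange 0 (n - L + 1) 1).foldl (fun max_len i =>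
          if (PySem.List.pyRange i (i + L) 1).foldl (fun cost j => cost + d j) 0 ≤ K
              ∧ L > max_len then L else max_len) a = max a (gA d K n L) from
        Amid d K L hL _ a ha]
      exact ih _ (by unfold gA; split_ifs <;> omega) (fun L' hL' => hpos L' (by simp [hL']))

theorem ABeq (d : Int → Int) (hd : ∀ j, 0 ≤ d j) (K n : Int) :
    (PySem.List.pyRange 1 (n + 1) 1).foldl (fun max_len length =>
      (PySem.List.pyRange 0 (n - length + 1) 1).foldl (fun max_len i =>
        if (PySem.List.pyRange i (i + length) 1).foldl (fun cost j => cost + d j) 0 ≤ K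
            ∧ length > max_len then length else max_len) max_len) 0
    = (PySem.List.pyRange 0 n 1).foldl (fun best i =>
        if extendWhile d K n i 0 - i > best then extendWhile d K n i 0 - i else best) 0 := by
  rw [outerA d K n _ 0 le_rfl
    (fun L hL => by have := (PySem.List.mem_pyRange_one).1 hL; omega)]
  rw [show (fun (best i : Int) =>
      if extendWhile d K n i 0 - i > best then extendWhile d K n i 0 - i else best)
      = (fun (m i : Int) => max m (extendWhile d K n i 0 - i)) from by
    funext b i; split_ifs <;> omega]
  apply le_antisymm
  · refine foldl_max_le _ _ 0 _ (le_foldl_max_init _ _ 0) ?_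
    intro L hL
    obtain ⟨hL1, hL2⟩ := (PySem.List.mem_pyRange_one).1 hL
    unfold gA
    split_ifs with hany
    · obtain ⟨i, hi, hWi⟩ := List.any_eq_true.mp hany
      obtain ⟨hi0, hi1⟩ := (PySem.List.mem_pyRange_one).1 hi
      have hWi' : W d i L ≤ K := of_decide_eq_true hWi
      have hext : i + L ≤ extendWhile d K n i 0 :=
        extendWhile_max d hd K n i i 0 le_rfl (by rw [sub_self, W_zero]) (i + L)
          (by omega) (by omega) (by rw [show i + L - i = L by ring]; exact hWi')
      calc L ≤ extendWhile d K n i 0 - i := by omega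
        _ ≤ _ := le_foldl_max_of_mem (fun i => extendWhile d K n i 0 - i) _ 0 i
              ((PySem.List.mem_pyRange_one).2 ⟨by omega, by omega⟩)
    · exact le_foldl_max_init _ _ 0
  · refine foldl_max_le _ _ 0 _ (le_foldl_max_init _ _ 0) ?_
    intro i hi
    obtain ⟨hi0, hi1⟩ := (PySem.List.mem_pyRange_one).1 hi
    have hge := extendWhile_ge d K n i 0
    have hle := extendWhile_le d K n i 0 (by omega)
    rcases eq_or_lt_of_le hge with heq | hlt
    · rw [← heq, sub_self]
      exact le_foldl_max_init _ _ 0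
    · have hfeas : W d i (extendWhile d K n i 0 - i) ≤ K :=
        extendWhile_feas d K n i i 0 le_rfl (by rw [sub_self, W_zero])
          (fun h => absurd h (lt_irrefl i)) hlt
      have hmem : (extendWhile d K n i 0 - i) ∈ PySem.List.pyRange 1 (n + 1) 1 :=
        (PySem.List.mem_pyRange_one).2 ⟨by omega, by omega⟩
      calc extendWhile d K n i 0 - i = gA d K n (extendWhile d K n i 0 - i) := by
            unfold gA
            rw [if_pos]
            exact List.any_eq_true.mpr ⟨i, (PySem.List.mem_pyRange_one).2 ⟨by omega, by omega⟩,
              decide_eq_true hfeas⟩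
        _ ≤ _ := le_foldl_max_of_mem (gA d K n) _ 0 _ hmem

-- ===== VERDICT (by name: the statement is the Claim_ definition above) =====
theorem sameSubstring_spec : Claim_equal_sameSubstring := by
  intro s t K _ _
  unfold Spec_sameSubstring sameSubstring sameSubstring_alt
  exact ABeq (fun j => |ordAt s j - ordAt t j|) (fun j => abs_nonneg _) K (PySem.Str.len s)
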